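-- pv_equiv track=rewrite | github.com/amirabasalinaghi/Xdl | src/xdl_relay/x_client.py | _iter_reference_ids
-- ===== SOURCE A (Python) =====
-- def _iter_reference_ids(references: list[dict]) -> list[str]:
--     if not references:
--         return []
--     ordered_ids: list[str] = []
--     seen: set[str] = set()
--     priority = ("retweeted", "reposted", "quoted", "replied_to")
--     for ref_type in priority:
--         for ref in references:
--             if str(ref.get("type", "")).lower() != ref_type:
--                 continue
--             ref_id = str(ref.get("id", "") or "")
--             if ref_id and ref_id not in seen:
--                 ordered_ids.append(ref_id)
--                 seen.add(ref_id)
--     for ref in references: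
--         ref_id = str(ref.get("id", "") or "")
--         if ref_id and ref_id not in seen:
--             ordered_ids.append(ref_id)
--             seen.add(ref_id)
--     return ordered_ids
-- ===== SOURCE B (Python) =====
-- def _iter_reference_ids(references: list[dict]) -> list[str]:
--     # One bucketing pass by priority rank, then one global dedup pass over the
--     # concatenated buckets (instead of A's repeated scans of the whole list).
--     prio = {"retweeted": 0, "reposted": 1, "quoted": 2, "replied_to": 3}
--     buckets = ([], [], [], [], [])
--     for ref in references:
--         rank = prio.get(str(ref.get("type", "")).lower(), 4)
--         buckets[rank].append(str(ref.get("id", "") or ""))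
--     ordered_ids: list[str] = []
--     seen: set[str] = set()
--     for rid in buckets[0] + buckets[1] + buckets[2] + buckets[3] + buckets[4]:
--         if rid and rid not in seen:
--             ordered_ids.append(rid)
--             seen.add(rid)
--     return ordered_ids
-- ===== Notes on version B (the rewrite author's own statement) =====
-- stated objective: alternative
-- what changed: A scans the whole reference list once per priority type plus a final leftover scan with an interleaved seen-set; B makes a single bucketing pass that groups each reference's id by its priority rank, then one global dedup pass over the concatenated buckets.
import Mathlib
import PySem

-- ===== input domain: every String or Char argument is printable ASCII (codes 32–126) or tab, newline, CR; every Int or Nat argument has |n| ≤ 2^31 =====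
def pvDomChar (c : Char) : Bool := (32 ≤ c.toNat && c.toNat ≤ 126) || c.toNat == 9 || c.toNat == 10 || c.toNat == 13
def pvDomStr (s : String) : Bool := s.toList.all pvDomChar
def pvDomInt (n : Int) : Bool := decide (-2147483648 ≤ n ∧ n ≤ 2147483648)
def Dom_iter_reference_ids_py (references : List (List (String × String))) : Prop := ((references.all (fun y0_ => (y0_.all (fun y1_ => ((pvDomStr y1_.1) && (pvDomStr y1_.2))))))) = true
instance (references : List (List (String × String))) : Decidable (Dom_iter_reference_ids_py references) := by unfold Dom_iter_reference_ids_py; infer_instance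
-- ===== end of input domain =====

-- B replaces A's five scans of the whole reference list by one bucketing pass plus one dedup pass (alternative decomposition, same asymptotic cost).


-- ===== PORT A =====
-- literal port: outer loop over the priority tuple, inner loop over references
-- (the Python `continue` becomes the else-branch), then the leftover loop.
def iter_reference_ids_py (references : List (List (String × String))) : List String :=
  if references = [] then []
  else
    let priority : List String := ["retweeted", "reposted", "quoted", "replied_to"]
    let st1 := priority.foldl (fun (st : List String × PySem.Set String) ref_type =>
      references.foldl (fun st ref =>
        if PySem.Str.lower ((PySem.Dict.mk ref).getD "type" "") = ref_type then
          let v := (PySem.Dict.mk ref).getD "id" ""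
          let ref_id := if v = "" then "" else v          -- str(... or "")
          if ref_id ≠ "" ∧ ¬ (PySem.Set.contains st.2 ref_id = true) then
            (st.1 ++ [ref_id], PySem.Set.add st.2 ref_id)
          else st
        else st) st) ([], PySem.Set.empty)
    let st2 := references.foldl (fun (st : List String × PySem.Set String) ref =>
      let v := (PySem.Dict.mk ref).getD "id" ""
      let ref_id := if v = "" then "" else v
      if ref_id ≠ "" ∧ ¬ (PySem.Set.contains st.2 ref_id = true) then
        (st.1 ++ [ref_id], PySem.Set.add st.2 ref_id)
      else st) st1
    st2.1

-- ===== PORT B =====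
structure PvBuckets where
  b0 : List String
  b1 : List String
  b2 : List String
  b3 : List String
  b4 : List String
deriving Repr, DecidableEq

def iter_reference_ids_py_alt (references : List (List (String × String))) : List String :=
  let prio : PySem.Dict String Int :=
    PySem.Dict.ofList [("retweeted", 0), ("reposted", 1), ("quoted", 2), ("replied_to", 3)]
  let bs := references.foldl (fun (b : PvBuckets) ref =>
      let rank := prio.getD (PySem.Str.lower ((PySem.Dict.mk ref).getD "type" "")) 4
      let v := (PySem.Dict.mk ref).getD "id" ""
      let rid := if v = "" then "" else v                 -- str(... or "")
      if rank = 0 then { b with b0 := b.b0 ++ [rid] }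
      else if rank = 1 then { b with b1 := b.b1 ++ [rid] }
      else if rank = 2 then { b with b2 := b.b2 ++ [rid] }
      else if rank = 3 then { b with b3 := b.b3 ++ [rid] }
      else { b with b4 := b.b4 ++ [rid] })
    ⟨[], [], [], [], []⟩
  let st := (bs.b0 ++ bs.b1 ++ bs.b2 ++ bs.b3 ++ bs.b4).foldl
    (fun (st : List String × PySem.Set String) rid =>
      if rid ≠ "" ∧ ¬ (PySem.Set.contains st.2 rid = true) then
        (st.1 ++ [rid], PySem.Set.add st.2 rid)
      else st) ([], PySem.Set.empty)
  st.1

-- ===== PRECONDITION & SPEC =====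
def Spec_iter_reference_ids_py (references : List (List (String × String))) (out : List String) : Prop := out = iter_reference_ids_py_alt references
instance (references : List (List (String × String))) (out : List String) : Decidable (Spec_iter_reference_ids_py references out) := by unfold Spec_iter_reference_ids_py; infer_instance

-- ===== CLAIM (what is proved, stated in full; the proofs are below) =====
def Claim_equal_iter_reference_ids_py : Prop := ∀ (references : List (List (String × String))), Dom_iter_reference_ids_py references → Spec_iter_reference_ids_py references (iter_reference_ids_py references)

-- ===== LEMMAS AND PROOFS =====

-- shared vocabulary: the id / lowered type / priority rank of a reference,
-- the dedup step shared by both ports, and the per-rank id lists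
def pvId (ref : List (String × String)) : String :=
  let v := (PySem.Dict.mk ref).getD "id" ""
  if v = "" then "" else v

def pvLt (ref : List (String × String)) : String :=
  PySem.Str.lower ((PySem.Dict.mk ref).getD "type" "")

def pvRankOf (s : String) : Int :=
  (PySem.Dict.ofList [("retweeted", (0:Int)), ("reposted", 1), ("quoted", 2), ("replied_to", 3)]).getD s 4

def pvRank (ref : List (String × String)) : Int := pvRankOf (pvLt ref)

def pvDStep (st : List String × PySem.Set String) (rid : String) : List String × PySem.Set String :=
  if rid ≠ "" ∧ ¬ (PySem.Set.contains st.2 rid = true) then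
    (st.1 ++ [rid], PySem.Set.add st.2 rid)
  else st

def pvGStep (st : List String × PySem.Set String) (ref : List (String × String)) : List String × PySem.Set String :=
  pvDStep st (pvId ref)

def pvGuard (t : String) (st : List String × PySem.Set String) (ref : List (String × String)) : List String × PySem.Set String :=
  if pvLt ref = t then pvGStep st ref else st

def pvBStep (b : PvBuckets) (ref : List (String × String)) : PvBuckets :=
  if pvRank ref = 0 then { b with b0 := b.b0 ++ [pvId ref] }
  else if pvRank ref = 1 then { b with b1 := b.b1 ++ [pvId ref] }
  else if pvRank ref = 2 then { b with b2 := b.b2 ++ [pvId ref] }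
  else if pvRank ref = 3 then { b with b3 := b.b3 ++ [pvId ref] }
  else { b with b4 := b.b4 ++ [pvId ref] }

def pvIds (references : List (List (String × String))) (r : Int) : List String :=
  (references.filter (fun x => decide (pvRank x = r))).map pvId

-- the literal dictionary lookup as an if-chain
lemma pvRankOf_spec (s : String) : pvRankOf s =
    if s = "retweeted" then 0 else if s = "reposted" then 1
    else if s = "quoted" then 2 else if s = "replied_to" then 3 else 4 := by
  unfold pvRankOf
  have h : PySem.Dict.ofList [("retweeted", (0:Int)), ("reposted", 1), ("quoted", 2), ("replied_to", 3)]
      = PySem.Dict.mk [("retweeted", (0:Int)), ("reposted", 1), ("quoted", 2), ("replied_to", 3)] := by decide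
  rw [h]
  simp only [PySem.Dict.getD, PySem.Dict.get?_mk_cons]
  by_cases h0 : "retweeted" = s
  · subst h0; decide
  by_cases h1 : "reposted" = s
  · subst h1; decide
  by_cases h2 : "quoted" = s
  · subst h2; decide
  by_cases h3 : "replied_to" = s
  · subst h3; decide
  have g0 : ¬ s = "retweeted" := fun e => h0 e.symm
  have g1 : ¬ s = "reposted" := fun e => h1 e.symm
  have g2 : ¬ s = "quoted" := fun e => h2 e.symm
  have g3 : ¬ s = "replied_to" := fun e => h3 e.symm
  simp [h0, h1, h2, h3, g0, g1, g2, g3, PySem.Dict.get?]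

lemma pvRank_zero_iff (x : List (String × String)) : pvRank x = 0 ↔ pvLt x = "retweeted" := by
  unfold pvRank; rw [pvRankOf_spec]; split_ifs <;> simp_all

lemma pvRank_one_iff (x : List (String × String)) : pvRank x = 1 ↔ pvLt x = "reposted" := by
  unfold pvRank; rw [pvRankOf_spec]; split_ifs <;> simp_all

lemma pvRank_two_iff (x : List (String × String)) : pvRank x = 2 ↔ pvLt x = "quoted" := by
  unfold pvRank; rw [pvRankOf_spec]; split_ifs <;> simp_all

lemma pvRank_three_iff (x : List (String × String)) : pvRank x = 3 ↔ pvLt x = "replied_to" := by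
  unfold pvRank; rw [pvRankOf_spec]; split_ifs <;> simp_all

lemma pvRank_cases (x : List (String × String)) :
    pvRank x = 0 ∨ pvRank x = 1 ∨ pvRank x = 2 ∨ pvRank x = 3 ∨ pvRank x = 4 := by
  unfold pvRank; rw [pvRankOf_spec]; split_ifs <;> simp

-- the ports, re-stated in the shared vocabulary (definitional)
lemma pvA_char (refs : List (List (String × String))) (h : ¬ refs = []) :
    iter_reference_ids_py refs =
      (refs.foldl pvGStep
        (refs.foldl (pvGuard "replied_to")
          (refs.foldl (pvGuard "quoted")
            (refs.foldl (pvGuard "reposted")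
              (refs.foldl (pvGuard "retweeted") ([], PySem.Set.empty)))))).1 := by
  unfold iter_reference_ids_py
  rw [if_neg h]
  rfl

lemma pvB_char (refs : List (List (String × String))) :
    iter_reference_ids_py_alt refs =
      (let bs := refs.foldl pvBStep ⟨[], [], [], [], []⟩
       ((bs.b0 ++ bs.b1 ++ bs.b2 ++ bs.b3 ++ bs.b4).foldl pvDStep ([], PySem.Set.empty)).1) := rfl

-- the seen-set only grows
lemma pvDStep_mono {st : List String × PySem.Set String} {rid a : String}
    (h : a ∈ st.2) : a ∈ (pvDStep st rid).2 := by
  unfold pvDStep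
  split
  · simp only [PySem.Set.add]; split
    · exact h
    · exact List.mem_append_left _ h
  · exact h

lemma pvFoldG_mono {l : List (List (String × String))} {st : List String × PySem.Set String} {a : String}
    (h : a ∈ st.2) : a ∈ (l.foldl pvGStep st).2 := by
  induction l generalizing st with
  | nil => exact h
  | cons x xs ih => exact ih (pvDStep_mono h)

-- a processed nonempty id ends up in the seen-set
lemma pvFoldG_collect {l : List (List (String × String))} {st : List String × PySem.Set String}
    {x : List (String × String)} (hx : x ∈ l) (hne : pvId x ≠ "") :
    pvId x ∈ (l.foldl pvGStep st).2 := by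
  induction l generalizing st with
  | nil => cases hx
  | cons y ys ih =>
    rcases List.mem_cons.mp hx with he | hx
    · subst he
      apply pvFoldG_mono (st := pvGStep st x)
      unfold pvGStep pvDStep
      split
      · simp only [PySem.Set.add]; split
        · rename_i hc
          simpa [PySem.Set.contains] using hc
        · exact List.mem_append_right _ (List.mem_singleton.mpr rfl)
      · rename_i hc
        simp only [not_and, not_not] at hc
        simpa [PySem.Set.contains] using hc hne
    · exact ih hx

-- the guarded pass is the dedup fold over the filtered list
lemma pvFold_guard_filter (t : String) (l : List (List (String × String)))
    (st : List String × PySem.Set String) :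
    l.foldl (pvGuard t) st = (l.filter (fun x => decide (pvLt x = t))).foldl pvGStep st := by
  induction l generalizing st with
  | nil => rfl
  | cons x xs ih =>
    by_cases h : pvLt x = t <;> simp [pvGuard, h, ih]

lemma pvFoldG_map (l : List (List (String × String))) (st : List String × PySem.Set String) :
    l.foldl pvGStep st = (l.map pvId).foldl pvDStep st := by
  rw [List.foldl_map]; rfl

-- leftover pass: references whose id is empty or already seen are skipped
lemma pvFold_skip (l : List (List (String × String))) (st : List String × PySem.Set String)
    (h : ∀ x ∈ l, pvRank x ≠ 4 → pvId x = "" ∨ pvId x ∈ st.2) :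
    l.foldl pvGStep st = (l.filter (fun x => decide (pvRank x = 4))).foldl pvGStep st := by
  induction l generalizing st with
  | nil => rfl
  | cons x xs ih =>
    by_cases hr : pvRank x = 4
    · simp only [List.filter_cons, hr, decide_true, List.foldl_cons]
      exact ih (pvGStep st x) (fun y hy hy4 => by
        rcases h y (List.mem_cons_of_mem _ hy) hy4 with he | hs
        · exact Or.inl he
        · exact Or.inr (pvDStep_mono hs))
    · have hskip : pvGStep st x = st := by
        rcases h x List.mem_cons_self hr with he | hs
        · simp [pvGStep, pvDStep, he]
        · simp only [pvGStep, pvDStep]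
          rw [if_neg]
          simp only [not_and, not_not]
          intro _
          simpa [PySem.Set.contains] using hs
      simp only [List.filter_cons, hr, decide_false, List.foldl_cons, hskip]
      exact ih st (fun y hy hy4 => h y (List.mem_cons_of_mem _ hy) hy4)

-- the bucketing pass computes the five per-rank id lists
lemma pvBuckets_eq (l : List (List (String × String))) (b : PvBuckets) :
    l.foldl pvBStep b
      = ⟨b.b0 ++ pvIds l 0, b.b1 ++ pvIds l 1, b.b2 ++ pvIds l 2,
         b.b3 ++ pvIds l 3, b.b4 ++ pvIds l 4⟩ := by
  induction l generalizing b with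
  | nil => simp [pvIds]
  | cons x xs ih =>
    simp only [List.foldl_cons]
    rcases pvRank_cases x with h | h | h | h | h <;>
      simp [pvBStep, h, ih, pvIds, List.append_assoc]

-- ===== VERDICT (by name: the statement is the Claim_ definition above) =====
theorem iter_reference_ids_py_spec : Claim_equal_iter_reference_ids_py := by
  intro refs _
  unfold Spec_iter_reference_ids_py
  by_cases h : refs = []
  · subst h; rfl
  rw [pvA_char refs h, pvB_char refs]
  simp only [pvBuckets_eq, List.nil_append]
  -- the four priority passes are dedup folds over the per-rank id lists
  rw [pvFold_guard_filter, pvFold_guard_filter, pvFold_guard_filter, pvFold_guard_filter]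
  have e0 : refs.filter (fun x => decide (pvLt x = "retweeted")) = refs.filter (fun x => decide (pvRank x = 0)) :=
    List.filter_congr (fun x _ => by simp [pvRank_zero_iff])
  have e1 : refs.filter (fun x => decide (pvLt x = "reposted")) = refs.filter (fun x => decide (pvRank x = 1)) :=
    List.filter_congr (fun x _ => by simp [pvRank_one_iff])
  have e2 : refs.filter (fun x => decide (pvLt x = "quoted")) = refs.filter (fun x => decide (pvRank x = 2)) :=
    List.filter_congr (fun x _ => by simp [pvRank_two_iff])
  have e3 : refs.filter (fun x => decide (pvLt x = "replied_to")) = refs.filter (fun x => decide (pvRank x = 3)) :=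
    List.filter_congr (fun x _ => by simp [pvRank_three_iff])
  rw [e0, e1, e2, e3]
  -- the leftover pass only processes rank-4 references
  set S3 := (refs.filter (fun x => decide (pvRank x = 3))).foldl pvGStep
      ((refs.filter (fun x => decide (pvRank x = 2))).foldl pvGStep
        ((refs.filter (fun x => decide (pvRank x = 1))).foldl pvGStep
          ((refs.filter (fun x => decide (pvRank x = 0))).foldl pvGStep ([], PySem.Set.empty)))) with hS3
  have hseen : ∀ x ∈ refs, pvRank x ≠ 4 → pvId x = "" ∨ pvId x ∈ S3.2 := by
    intro x hx h4
    by_cases hne : pvId x = ""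
    · exact Or.inl hne
    right
    rcases pvRank_cases x with h | h | h | h | h
    · -- collected in pass 0, preserved by passes 1,2,3
      refine pvFoldG_mono (pvFoldG_mono (pvFoldG_mono (pvFoldG_collect ?_ hne)))
      exact List.mem_filter.mpr ⟨hx, by simp [h]⟩
    · refine pvFoldG_mono (pvFoldG_mono (pvFoldG_collect ?_ hne))
      exact List.mem_filter.mpr ⟨hx, by simp [h]⟩
    · refine pvFoldG_mono (pvFoldG_collect ?_ hne)
      exact List.mem_filter.mpr ⟨hx, by simp [h]⟩
    · refine pvFoldG_collect ?_ hne
      exact List.mem_filter.mpr ⟨hx, by simp [h]⟩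
    · exact absurd h h4
  rw [pvFold_skip refs S3 hseen]
  -- both sides are now the same dedup fold over the concatenated id lists
  simp only [pvFoldG_map, pvIds, List.foldl_append]
  rw [hS3]
  simp only [pvFoldG_map]
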